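-- pv_equiv track=rewrite | github.com/kcyh7428/K2Bi | scripts/lib/deploy_config.py | _covered
-- ===== SOURCE A (Python) =====
-- def _covered(path: str, targets: list[tuple[str, str]], excludes: list[str]) -> bool:
--     """True if `path` is covered by a target (deploys) or an exclude
--     (intentionally local). Full-path prefix match, not top-segment match."""
--     for tpath, _ in targets:
--         if path == tpath or path.startswith(tpath + "/"):
--             return True
--     for e in excludes:
--         if path == e or path.startswith(e + "/"):
--             return True
--     return False
-- ===== SOURCE B (Python) =====
-- def _covered(path: str, targets: list[tuple[str, str]], excludes: list[str]) -> bool: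
--     """True if `path` is covered by a target (deploys) or an exclude
--     (intentionally local). Full-path prefix match, not top-segment match."""
--     covered = {tpath for tpath, _ in targets}
--     covered.update(excludes)
--     candidates = [path] + [path[:i] for i, ch in enumerate(path) if ch == "/"]
--     return any(c in covered for c in candidates)
-- ===== Notes on version B (the rewrite author's own statement) =====
-- stated objective: alternative
-- what changed: Instead of scanning targets and excludes with a per-entry startswith test, B builds one set of all target/exclude paths and generates the path's own prefix candidates (the full path plus each cut at a '/'), returning True iff any candidate is in the set.
import Mathlib
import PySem

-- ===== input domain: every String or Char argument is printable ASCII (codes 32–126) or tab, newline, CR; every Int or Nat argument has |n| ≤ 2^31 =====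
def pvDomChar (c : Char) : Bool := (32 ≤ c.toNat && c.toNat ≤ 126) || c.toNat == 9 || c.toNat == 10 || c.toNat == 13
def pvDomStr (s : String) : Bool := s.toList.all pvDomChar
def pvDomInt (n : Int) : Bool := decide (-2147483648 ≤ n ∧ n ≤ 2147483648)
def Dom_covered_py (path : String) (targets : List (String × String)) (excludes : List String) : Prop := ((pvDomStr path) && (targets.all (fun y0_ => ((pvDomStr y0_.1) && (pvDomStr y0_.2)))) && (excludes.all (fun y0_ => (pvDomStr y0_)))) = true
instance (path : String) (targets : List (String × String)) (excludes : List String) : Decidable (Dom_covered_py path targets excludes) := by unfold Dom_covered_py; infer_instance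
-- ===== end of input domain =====

-- B replaces the per-entry startswith scans by one set of all target/exclude paths
-- probed with the path's own '/'-cut prefix candidates (alternative decomposition).

-- ===== PORT A =====
-- A's two early-return loops, on strings as code-point lists (tpath + "/" is ++ ['/']).
def coveredA_excl (path : List Char) (excludes : List (List Char)) : Bool :=
  match excludes with
  | [] => false
  | e :: rest =>
    if path == e || PySem.Chars.startswith path (e ++ ['/']) then true
    else coveredA_excl path rest

def coveredA_tgt (path : List Char) (targets : List (List Char × List Char))
    (excludes : List (List Char)) : Bool :=
  match targets with
  | [] => coveredA_excl path excludes
  | (tpath, _) :: rest =>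
    if path == tpath || PySem.Chars.startswith path (tpath ++ ['/']) then true
    else coveredA_tgt path rest excludes

def covered_py (path : String) (targets : List (String × String)) (excludes : List String) : Bool :=
  coveredA_tgt path.toList (targets.map (fun t => (t.1.toList, t.2.toList)))
    (excludes.map String.toList)

-- ===== PORT B =====
def covered_py_alt (path : String) (targets : List (String × String)) (excludes : List String) : Bool :=
  let covered : PySem.Set (List Char) :=
    PySem.Set.update (PySem.Set.ofList (targets.map (fun t => t.1.toList)))
      (excludes.map String.toList)
  let p := path.toList
  let candidates : List (List Char) :=
    p :: (PySem.List.enumerate p).filterMap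
      (fun ic => if ic.2 == '/' then some (PySem.List.slice p none (some ic.1)) else none)
  candidates.any (fun c => PySem.Set.contains covered c)

-- ===== PRECONDITION & SPEC =====
def Spec_covered_py (path : String) (targets : List (String × String)) (excludes : List String) (out : Bool) : Prop := out = covered_py_alt path targets excludes
instance (path : String) (targets : List (String × String)) (excludes : List String) (out : Bool) : Decidable (Spec_covered_py path targets excludes out) := by unfold Spec_covered_py; infer_instance

-- ===== CLAIM (what is proved, stated in full; the proofs are below) =====
def Claim_equal_covered_py : Prop := ∀ (path : String) (targets : List (String × String)) (excludes : List String), Dom_covered_py path targets excludes → Spec_covered_py path targets excludes (covered_py path targets excludes)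

-- ===== LEMMAS AND PROOFS =====

-- A's per-entry test, shared by both characterizations.
def pvCond (path q : List Char) : Bool :=
  path == q || PySem.Chars.startswith path (q ++ ['/'])

theorem coveredA_excl_eq_any (path : List Char) (ex : List (List Char)) :
    coveredA_excl path ex = ex.any (pvCond path) := by
  induction ex with
  | nil => rfl
  | cons e rest ih =>
      simp only [coveredA_excl, List.any_cons, pvCond]
      split_ifs with h
      · simp [h]
      · simp [h, ih]

theorem coveredA_tgt_eq_any (path : List Char) (ts : List (List Char × List Char))
    (ex : List (List Char)) :
    coveredA_tgt path ts ex = ((ts.map Prod.fst).any (pvCond path) || ex.any (pvCond path)) := by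
  induction ts with
  | nil => simp [coveredA_tgt, coveredA_excl_eq_any]
  | cons t rest ih =>
      obtain ⟨tp, td⟩ := t
      simp only [coveredA_tgt, List.map_cons, List.any_cons, pvCond]
      split_ifs with h
      · simp [h]
      · simp [h, ih]

theorem mem_enumerate_iff {α : Type} (xs : List α) (s : Int) (q : Int × α) :
    q ∈ PySem.List.enumerate xs s ↔ ∃ k : Nat, ∃ h : k < xs.length, q = (s + k, xs[k]) := by
  induction xs generalizing s with
  | nil => simp [PySem.List.enumerate_nil]
  | cons x xs ih =>
      rw [PySem.List.enumerate_cons]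
      simp only [List.mem_cons, ih]
      constructor
      · rintro (rfl | ⟨k, hk, rfl⟩)
        · exact ⟨0, by simp, by simp⟩
        · refine ⟨k + 1, by simp; omega, ?_⟩
          simp [Prod.ext_iff]
          omega
      · rintro ⟨k, hk, rfl⟩
        cases k with
        | zero => left; simp
        | succ k =>
            right
            refine ⟨k, by simp at hk; omega, ?_⟩
            simp [Prod.ext_iff]
            omega

-- (q ++ "/") is a prefix of path ↔ q is path cut at some '/'.
theorem prefix_slash_iff (path q : List Char) :
    (q ++ ['/']) <+: path ↔ ∃ k : Nat, ∃ h : k < path.length, path[k] = '/' ∧ q = path.take k := by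
  constructor
  · rintro ⟨t, ht⟩
    refine ⟨q.length, ?_, ?_, ?_⟩
    · subst ht; simp; try omega
    · subst ht; simp; try omega
    · subst ht; simp; try omega
  · rintro ⟨k, hk, hc, rfl⟩
    have h1 : path.take k ++ ['/'] = path.take (k + 1) := by
      rw [List.take_add_one]
      simp [List.getElem?_eq_getElem hk, hc]
    rw [h1]
    exact List.take_prefix _ _

theorem cand_mem_iff (p q : List Char) :
    (q ∈ p :: (PySem.List.enumerate p).filterMap
        (fun ic => if ic.2 == '/' then some (PySem.List.slice p none (some ic.1)) else none)) ↔
      pvCond p q = true := by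
  simp only [List.mem_cons, List.mem_filterMap, pvCond, Bool.or_eq_true, beq_iff_eq,
    PySem.Chars.startswith_iff, prefix_slash_iff]
  constructor
  · rintro (rfl | ⟨ic, hmem, hf⟩)
    · exact Or.inl rfl
    · rw [mem_enumerate_iff] at hmem
      obtain ⟨k, hk, rfl⟩ := hmem
      split_ifs at hf with hc
      · simp only [Option.some.injEq] at hf
        refine Or.inr ⟨k, hk, by simpa using hc, ?_⟩
        rw [← hf]
        rw [show ((0 : Int) + k) = ((k : Nat) : Int) by omega,
          PySem.List.slice_to_natCast]
  · rintro (rfl | ⟨k, hk, hc, rfl⟩)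
    · exact Or.inl rfl
    · right
      refine ⟨((0 : Int) + k, p[k]), ?_, ?_⟩
      · rw [mem_enumerate_iff]; exact ⟨k, hk, rfl⟩
      · simp only [hc, if_pos]
        rw [show ((0 : Int) + k) = ((k : Nat) : Int) by omega,
          PySem.List.slice_to_natCast]

theorem covered_eq_chars (path : List Char) (ts : List (List Char × List Char))
    (ex : List (List Char)) :
    coveredA_tgt path ts ex =
      (path :: (PySem.List.enumerate path).filterMap
          (fun ic => if ic.2 == '/' then some (PySem.List.slice path none (some ic.1)) else none)).any
        (fun c => PySem.Set.contains (PySem.Set.update (PySem.Set.ofList (ts.map Prod.fst)) ex) c) := by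
  rw [Bool.eq_iff_iff, coveredA_tgt_eq_any]
  simp only [List.any_eq_true, Bool.or_eq_true, PySem.Set.contains_iff, PySem.Set.mem_update,
    PySem.Set.mem_ofList, cand_mem_iff]
  constructor
  · rintro (⟨q, hq, hcond⟩ | ⟨q, hq, hcond⟩)
    · exact ⟨q, hcond, Or.inl hq⟩
    · exact ⟨q, hcond, Or.inr hq⟩
  · rintro ⟨q, hcond, hq | hq⟩
    · exact Or.inl ⟨q, hq, hcond⟩
    · exact Or.inr ⟨q, hq, hcond⟩

-- ===== VERDICT (by name: the statement is the Claim_ definition above) =====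
theorem covered_py_spec : Claim_equal_covered_py := by
  intro path targets excludes _
  unfold Spec_covered_py covered_py covered_py_alt
  rw [covered_eq_chars]
  simp [List.map_map, Function.comp_def]
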